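-- pv_equiv track=rewrite | github.com/imatg/Codigo-TFG-deteccion-de-comunidades | 25_nodos_60_aristas.py | individuo_comunidades
-- ===== SOURCE A (Python) =====
-- def individuo_comunidades(individuo):
--     comunidades=[]
--     copia_individuo=individuo.copy()
--
--     while copia_individuo!={}:
--         nodo=list(copia_individuo.keys())[0]
--         comunidad=[]
--         comunidad_anterior=[]
--         comunidad.append(nodo)
--         if nodo!=copia_individuo[nodo]:
--             comunidad.append(copia_individuo[nodo])
--
--             while comunidad!=comunidad_anterior :
--                 comunidad_anterior=comunidad.copy()
--                 for clave in copia_individuo.keys():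
--                     for miembro in comunidad_anterior:
--                         if copia_individuo[clave]==miembro and clave not in comunidad:
--                             comunidad.append(clave)
--
--         comunidades.append(comunidad)
--         for elemento in comunidad:
--             copia_individuo.pop(elemento, None)
--
--     return comunidades
-- ===== SOURCE B (Python) =====
-- def individuo_comunidades(individuo):
--     keys = list(individuo)
--     pos = {k: i for i, k in enumerate(keys)}
--     rev = {}
--     for k in keys:
--         t = individuo[k]
--         rev[t] = rev.get(t, []) + [k]
--     visited = set()
--     comunidades = []
--     for start in keys:
--         if start in visited:
--             continue
--         t = individuo[start]
--         if t == start: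
--             visited.add(start)
--             comunidades.append([start])
--             continue
--         comunidad = [start, t]
--         visited.add(start)
--         visited.add(t)
--         frontier = [start, t]
--         while frontier:
--             cands = [k for m in frontier for k in rev.get(m, []) if k not in visited]
--             cands.sort(key=lambda k: pos[k])
--             for k in cands:
--                 visited.add(k)
--             comunidad += cands
--             frontier = cands
--         comunidades.append(comunidad)
--     return comunidades
-- ===== Notes on version B (the rewrite author's own statement) =====
-- stated objective: faster
-- what changed: Replaces A's repeated whole-dictionary rescans (nested fixpoint loops with list membership tests and dict re-copying per community) by a reverse-adjacency index built once plus a layered frontier search with a visited set, emitting each layer's new members in original key order.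
import Mathlib
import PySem

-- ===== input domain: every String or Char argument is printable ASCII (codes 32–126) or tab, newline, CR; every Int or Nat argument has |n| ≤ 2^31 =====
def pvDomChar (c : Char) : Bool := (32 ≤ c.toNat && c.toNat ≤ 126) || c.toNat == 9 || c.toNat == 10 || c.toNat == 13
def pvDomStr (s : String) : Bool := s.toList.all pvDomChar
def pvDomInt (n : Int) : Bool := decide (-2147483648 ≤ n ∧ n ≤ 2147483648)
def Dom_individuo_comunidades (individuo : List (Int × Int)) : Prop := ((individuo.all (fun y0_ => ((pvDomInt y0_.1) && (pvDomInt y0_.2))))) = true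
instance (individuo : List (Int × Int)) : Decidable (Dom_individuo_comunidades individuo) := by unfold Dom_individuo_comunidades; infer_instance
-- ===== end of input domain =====

-- B replaces A's repeated full-dictionary fixpoint rescans by a reverse-adjacency index and a
-- layered frontier search (new members per layer emitted in original key order); measurably faster.

-- ===== PORT A =====
-- inner 'for clave in copia_individuo.keys(): for miembro in comunidad_anterior: …' pass
def pvAInner (d : PySem.Dict Int Int) (ant com : List Int) : List Int :=
  d.keys.foldl
    (fun com k => ant.foldl (fun com m => if d.getD k 0 = m ∧ k ∉ com then com ++ [k] else com) com)
    com

-- 'while comunidad != comunidad_anterior: …' (fuel is an upper bound on iterations, never reached)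
def pvALoop (d : PySem.Dict Int Int) : Nat → List Int → List Int → List Int
  | 0, com, _ => com
  | f+1, com, ant => if com = ant then com else pvALoop d f (pvAInner d com com) com

-- 'while copia_individuo != {}: …' (fuel likewise)
def pvAOuter : Nat → PySem.Dict Int Int → List (List Int)
  | 0, _ => []
  | f+1, d =>
    if d.keys = [] then []
    else
      let nodo := d.keys.headI
      let com :=
        if nodo ≠ d.getD nodo 0 then pvALoop d (d.size + 2) [nodo, d.getD nodo 0] []
        else [nodo]
      com :: pvAOuter f (com.foldl (fun d e => d.erase e) d)

def individuo_comunidades (individuo : List (Int × Int)) : List (List Int) :=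
  let d := PySem.Dict.ofList individuo
  pvAOuter (d.size + 1) d

-- ===== PORT B =====
-- '[k for m in frontier for k in rev.get(m, []) if k not in visited]'
def pvBGather (rev : PySem.Dict Int (List Int)) (visited : PySem.Set Int) (frontier : List Int) :
    List Int :=
  frontier.foldl
    (fun acc m => (rev.getD m []).foldl (fun acc k => if k ∈ visited then acc else acc ++ [k]) acc)
    []

-- 'while frontier: …' (fuel is an upper bound on layers, never reached)
def pvBLoop (rev : PySem.Dict Int (List Int)) (pos : PySem.Dict Int Int) :
    Nat → PySem.Set Int → List Int → List Int → List Int × PySem.Set Int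
  | 0, visited, com, _ => (com, visited)
  | f+1, visited, com, frontier =>
    if frontier = [] then (com, visited)
    else
      let cands := PySem.List.sorted (pvBGather rev visited frontier) (fun k => pos.getD k 0) false
      pvBLoop rev pos f (cands.foldl PySem.Set.add visited) (com ++ cands) cands

def individuo_comunidades_alt (individuo : List (Int × Int)) : List (List Int) :=
  let d := PySem.Dict.ofList individuo
  let keys := d.keys
  let pos : PySem.Dict Int Int :=
    (PySem.List.enumerate keys).foldl (fun p ik => p.insert ik.2 ik.1) PySem.Dict.empty
  let rev : PySem.Dict Int (List Int) :=
    keys.foldl (fun r k => r.modify (d.getD k 0) [] (· ++ [k])) PySem.Dict.empty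
  (keys.foldl
    (fun st start =>
      if start ∈ st.1 then st
      else
        let t := d.getD start 0
        if t = start then (PySem.Set.add st.1 start, st.2 ++ [[start]])
        else
          let r := pvBLoop rev pos (keys.length + 2)
            (PySem.Set.add (PySem.Set.add st.1 start) t) [start, t] [start, t]
          (r.2, st.2 ++ [r.1]))
    ((PySem.Set.empty : PySem.Set Int), ([] : List (List Int)))).2

-- ===== PRECONDITION & SPEC =====
def Spec_individuo_comunidades (individuo : List (Int × Int)) (out : List (List Int)) : Prop := out = individuo_comunidades_alt individuo
instance (individuo : List (Int × Int)) (out : List (List Int)) : Decidable (Spec_individuo_comunidades individuo out) := by unfold Spec_individuo_comunidades; infer_instance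

-- ===== CLAIM (what is proved, stated in full; the proofs are below) =====
def Claim_equal_individuo_comunidades : Prop := ∀ (individuo : List (Int × Int)), Dom_individuo_comunidades individuo → Spec_individuo_comunidades individuo (individuo_comunidades individuo)

-- ===== LEMMAS AND PROOFS =====

-- abstract round/fixpoint the two loops are proved equal to
def pvNew (d : PySem.Dict Int Int) (ant com : List Int) : List Int :=
  d.keys.filter (fun k => decide (d.getD k 0 ∈ ant ∧ k ∉ com))

def pvF (d : PySem.Dict Int Int) (com : List Int) : List Int := com ++ pvNew d com com

def pvFixLoop (d : PySem.Dict Int Int) : Nat → List Int → List Int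
  | 0, com => com
  | f+1, com => if pvF d com = com then com else pvFixLoop d f (pvF d com)

def pvMu (d : PySem.Dict Int Int) (com : List Int) : Nat :=
  (d.keys.filter (fun k => !decide (k ∈ com))).length


theorem pv_inner_mem (d : PySem.Dict Int Int) (ant com : List Int) (k : Int) (hk : k ∈ com) :
    ant.foldl (fun com m => if d.getD k 0 = m ∧ k ∉ com then com ++ [k] else com) com = com := by
  induction ant with
  | nil => rfl
  | cons m ms ih => simpa [hk] using ih

theorem pv_inner_not_mem (d : PySem.Dict Int Int) (ant : List Int) :
    ∀ (com : List Int) (k : Int), k ∉ com →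
    ant.foldl (fun com m => if d.getD k 0 = m ∧ k ∉ com then com ++ [k] else com) com
      = if d.getD k 0 ∈ ant then com ++ [k] else com := by
  induction ant with
  | nil => intro com k hk; simp
  | cons m ms ih =>
    intro com k hk
    by_cases hm : d.getD k 0 = m
    · simp only [List.foldl_cons, if_pos (show d.getD k 0 = m ∧ k ∉ com from ⟨hm, hk⟩)]
      rw [pv_inner_mem d ms (com ++ [k]) k (by simp)]
      simp [hm]
    · simp only [List.foldl_cons, if_neg (show ¬(d.getD k 0 = m ∧ k ∉ com) from by tauto)]
      rw [ih com k hk]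
      simp [List.mem_cons, hm]

theorem pv_round_eq (d : PySem.Dict Int Int) (ant : List Int) (ks : List Int) (hnd : ks.Nodup) :
    ∀ com : List Int,
      ks.foldl
        (fun com k => ant.foldl (fun com m => if d.getD k 0 = m ∧ k ∉ com then com ++ [k] else com) com)
        com
      = com ++ ks.filter (fun k => decide (d.getD k 0 ∈ ant ∧ k ∉ com)) := by
  induction ks with
  | nil => intro com; simp
  | cons k ks ih =>
    intro com
    rcases List.nodup_cons.mp hnd with ⟨hknot, hnd'⟩
    by_cases hcom : k ∈ com
    · rw [List.foldl_cons, pv_inner_mem d ant com k hcom, ih hnd' com]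
      congr 1
      rw [List.filter_cons_of_neg (by simp [hcom])]
    · rw [List.foldl_cons, pv_inner_not_mem d ant com k hcom]
      by_cases hin : d.getD k 0 ∈ ant
      · rw [if_pos hin, ih hnd' (com ++ [k])]
        have hfc : List.filter (fun x => decide (d.getD x 0 ∈ ant ∧ x ∉ com ++ [k])) ks
            = List.filter (fun x => decide (d.getD x 0 ∈ ant ∧ x ∉ com)) ks := by
          apply List.filter_congr
          intro x hx
          have hxk : x ≠ k := fun h => hknot (h ▸ hx)
          simp [List.mem_append, hxk]
        rw [hfc, List.filter_cons_of_pos (by simp [hin, hcom])]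
        simp
      · rw [if_neg hin, ih hnd' com]
        congr 1
        rw [List.filter_cons_of_neg (by simp [hin])]

theorem pv_countP_lt (l : List Int) (p q : Int → Bool) (hpq : ∀ x, p x = true → q x = true)
    (x : Int) (hx : x ∈ l) (hqx : q x = true) (hpx : p x = false) :
    l.countP p < l.countP q := by
  induction l with
  | nil => cases hx
  | cons a l ih =>
    rcases List.mem_cons.mp hx with rfl | hx'
    · rw [List.countP_cons, List.countP_cons, hpx, hqx]
      simp only [if_true]
      rw [if_neg (by simp)]
      have := List.countP_mono_left (l := l) (p := p) (q := q) (fun x _ => hpq x)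
      omega
    · rw [List.countP_cons, List.countP_cons]
      have := ih hx'
      have h2 : (if p a = true then 1 else 0) ≤ (if q a = true then 1 else 0) := by
        by_cases h : p a = true
        · simp [h, hpq a h]
        · rw [if_neg h]; split <;> omega
      omega

theorem pvNew_sub (d : PySem.Dict Int Int) (ant com : List Int) :
    ∀ x ∈ pvNew d ant com, x ∈ d.keys ∧ x ∉ com := by
  intro x hx
  have h1 := List.of_mem_filter hx
  rw [decide_eq_true_eq] at h1
  exact ⟨List.mem_of_mem_filter hx, h1.2⟩

theorem pvMu_lt (d : PySem.Dict Int Int) (com new : List Int)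
    (hsub : ∀ x ∈ new, x ∈ d.keys ∧ x ∉ com) (hne : new ≠ []) :
    pvMu d (com ++ new) < pvMu d com := by
  obtain ⟨x, hx⟩ := List.exists_mem_of_ne_nil new hne
  unfold pvMu
  rw [← List.countP_eq_length_filter, ← List.countP_eq_length_filter]
  apply pv_countP_lt _ _ _ _ x (hsub x hx).1
  · simp [(hsub x hx).2]
  · simp [hx]
  · intro y hy
    simp only [Bool.not_eq_eq_eq_not, Bool.not_true, decide_eq_false_iff_not] at *
    intro hmem
    exact hy (List.mem_append_left _ hmem)

theorem pvF_ne (d : PySem.Dict Int Int) (com : List Int) (h : pvNew d com com ≠ []) :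
    pvF d com ≠ com := by
  unfold pvF
  intro hc
  exact h (by simpa using congrArg List.length hc)

theorem pvF_ne_iff (d : PySem.Dict Int Int) (com : List Int) :
    pvF d com = com ↔ pvNew d com com = [] := by
  constructor
  · intro hc
    by_contra h
    exact pvF_ne d com h hc
  · intro h; simp [pvF, h]

theorem pvMu_F_lt (d : PySem.Dict Int Int) (com : List Int) (h : pvF d com ≠ com) :
    pvMu d (pvF d com) < pvMu d com := by
  apply pvMu_lt d com _ (pvNew_sub d com com)
  intro hnil
  exact h ((pvF_ne_iff d com).mpr hnil)

theorem pvFixLoop_stable (d : PySem.Dict Int Int) :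
    ∀ (f f' : Nat) (com : List Int), pvMu d com < f → pvMu d com < f' →
      pvFixLoop d f com = pvFixLoop d f' com := by
  intro f
  induction f with
  | zero => intro f' com h; omega
  | succ f ih =>
    intro f' com h h'
    obtain ⟨f'', rfl⟩ : ∃ f'', f' = f'' + 1 := ⟨f' - 1, by omega⟩
    by_cases hfix : pvF d com = com
    · simp [pvFixLoop, hfix]
    · rw [pvFixLoop, pvFixLoop, if_neg hfix, if_neg hfix]
      have hlt := pvMu_F_lt d com hfix
      by_cases hf'' : f'' = 0
      · omega
      · exact ih f'' (pvF d com) (by omega) (by omega)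

theorem pvFixLoop_prefix (d : PySem.Dict Int Int) :
    ∀ (f : Nat) (com : List Int), com <+: pvFixLoop d f com := by
  intro f
  induction f with
  | zero => intro com; exact List.prefix_refl com
  | succ f ih =>
    intro com
    rw [pvFixLoop]
    split
    · exact List.prefix_refl com
    · exact List.IsPrefix.trans (List.prefix_append com _) (ih (pvF d com))

theorem pvAInner_eq (d : PySem.Dict Int Int) (hnd : d.keys.Nodup) (com : List Int) :
    pvAInner d com com = pvF d com := by
  unfold pvAInner pvF pvNew
  exact pv_round_eq d com d.keys hnd com

theorem pvALoop_eq (d : PySem.Dict Int Int) (hnd : d.keys.Nodup) :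
    ∀ (f : Nat) (com ant : List Int), com ≠ ant → pvMu d com < f →
      pvALoop d (f+1) com ant = pvFixLoop d f com := by
  intro f
  induction f with
  | zero => intro com ant h1 h2; omega
  | succ f ih =>
    intro com ant hne hmu
    rw [pvALoop, if_neg hne, pvAInner_eq d hnd com]
    by_cases hfix : pvF d com = com
    · rw [hfix, pvALoop, if_pos rfl, pvFixLoop, if_pos hfix]
    · have hlt := pvMu_F_lt d com hfix
      rw [pvFixLoop, if_neg hfix]
      exact ih (pvF d com) com hfix (by omega)

theorem pvBGather_eq (rev : PySem.Dict Int (List Int)) (Vb : PySem.Set Int) (fr : List Int) :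
    pvBGather rev Vb fr
      = fr.flatMap (fun m => (rev.getD m []).filter (fun k => !decide (k ∈ Vb))) := by
  unfold pvBGather
  have hinner : ∀ (acc : List Int) (m : Int),
      (rev.getD m []).foldl (fun acc k => if k ∈ Vb then acc else acc ++ [k]) acc
        = acc ++ (rev.getD m []).filter (fun k => !decide (k ∈ Vb)) := by
    intro acc m
    have h1 : (fun (acc : List Int) (k : Int) => if k ∈ Vb then acc else acc ++ [k])
        = (fun acc k => if (!decide (k ∈ Vb)) = true then acc ++ [(fun x => x) k] else acc) := by
      funext acc k
      by_cases h : k ∈ Vb <;> simp [h]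
    rw [h1, PySem.List.foldl_append_if]
    simp
  have h2 : (fun (acc : List Int) (m : Int) =>
      (rev.getD m []).foldl (fun acc k => if k ∈ Vb then acc else acc ++ [k]) acc)
      = (fun acc m => acc ++ (rev.getD m []).filter (fun k => !decide (k ∈ Vb))) := by
    funext acc m; exact hinner acc m
  rw [h2, PySem.List.foldl_append_eq_flatMap]
  simp

theorem pv_filter_split_perm (l : List Int) (p1 p2 p12 : Int → Bool)
    (hor : ∀ x, p12 x = (p1 x || p2 x)) (hnot : ∀ x, ¬(p1 x = true ∧ p2 x = true)) :
    (l.filter p1 ++ l.filter p2).Perm (l.filter p12) := by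
  induction l with
  | nil => simp
  | cons a l ih =>
    by_cases h1 : p1 a = true
    · have h2 : ¬ p2 a = true := fun h => hnot a ⟨h1, h⟩
      rw [List.filter_cons_of_pos h1, List.filter_cons_of_neg h2,
        List.filter_cons_of_pos (by rw [hor]; simp [h1])]
      simpa using ih.cons a
    · by_cases h2 : p2 a = true
      · rw [List.filter_cons_of_neg h1, List.filter_cons_of_pos h2,
          List.filter_cons_of_pos (by rw [hor]; simp [h2])]
        exact (List.perm_middle).trans (ih.cons a)
      · rw [List.filter_cons_of_neg h1, List.filter_cons_of_neg h2,
          List.filter_cons_of_neg (by rw [hor]; simp [h1, h2])]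
        exact ih

theorem pv_flatMap_perm (l : List Int) (tgt : Int → Int) (c : Int → Bool) :
    ∀ fr : List Int, fr.Nodup →
    (fr.flatMap (fun m => l.filter (fun k => decide (tgt k = m) && c k))).Perm
      (l.filter (fun k => decide (tgt k ∈ fr) && c k)) := by
  intro fr
  induction fr with
  | nil => simp
  | cons m ms ih =>
    intro hnd
    rcases List.nodup_cons.mp hnd with ⟨hm, hnd'⟩
    rw [List.flatMap_cons]
    refine List.Perm.trans (List.Perm.append_left _ (ih hnd')) ?_
    apply pv_filter_split_perm
    · intro x
      by_cases hx : tgt x = m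
      · simp [hx]
      · simp [hx, List.mem_cons]
    · intro x ⟨ha, hb⟩
      simp only [Bool.and_eq_true, decide_eq_true_eq] at ha hb
      exact hm (ha.1 ▸ hb.1)

-- rev characterization
theorem pv_rev_eq (d : PySem.Dict Int Int) (keys : List Int) (m : Int) :
    (keys.foldl (fun r k => r.modify (d.getD k 0) [] (· ++ [k])) PySem.Dict.empty).getD m []
      = keys.filter (fun k => decide (d.getD k 0 = m)) := by
  have h : keys.foldl (fun r k => r.modify (d.getD k 0) [] (· ++ [k])) PySem.Dict.empty
      = (keys.map (fun k => (d.getD k 0, k))).foldl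
          (fun r p => r.modify p.1 [] (· ++ [p.2])) PySem.Dict.empty := by
    rw [List.foldl_map]
  rw [h, PySem.Dict.getD_foldl_modify_append, List.filter_map]
  simp only [PySem.Dict.getD_empty, List.nil_append, List.map_map]
  have h2 : ((fun (p : Int × Int) => p.1 == m) ∘ fun k => (d.getD k 0, k)) = (fun k => decide (d.getD k 0 = m)) := by
    funext k
    by_cases h : d.getD k 0 = m <;> simp [h]
  rw [h2]
  have h3 : ((fun (x : Int × Int) => x.2) ∘ fun k => (d.getD k 0, k)) = (fun k : Int => k) := by
    funext k; rfl
  rw [h3, List.map_id']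

-- pos characterization
theorem pv_pos_getD (keys : List Int) (hnd : keys.Nodup) (i : Nat) (hi : i < keys.length) :
    ((PySem.List.enumerate keys).foldl (fun (p : PySem.Dict Int Int) (ik : Int × Int) => p.insert ik.2 ik.1) PySem.Dict.empty).getD
      keys[i] 0 = (i : Int) := by
  set pos := (PySem.List.enumerate keys).foldl (fun (p : PySem.Dict Int Int) (ik : Int × Int) => p.insert ik.2 ik.1) PySem.Dict.empty with hpos
  have hitems : pos.items = [] ++ (PySem.List.enumerate keys).map (fun ik : Int × Int => (ik.2, ik.1)) := by
    rw [hpos]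
    exact PySem.Dict.items_foldl_insert_fresh _ (fun ik : Int × Int => ik.2) (fun ik : Int × Int => ik.1) _
      (fun a _ => PySem.Dict.contains_empty _)
      (by rw [PySem.List.map_snd_enumerate]; exact hnd)
  have hknd : pos.keys.Nodup := by
    rw [hpos]
    exact PySem.Dict.nodup_keys_foldl_insert_key _ (fun ik : Int × Int => ik.2) (fun _ (ik : Int × Int) => ik.1) _
      PySem.Dict.nodup_keys_empty
  have hmem : (keys[i], (i : Int)) ∈ pos.items := by
    rw [hitems]
    simp only [List.nil_append, List.mem_map]
    refine ⟨(PySem.List.enumerate keys)[i]'(by simp [PySem.List.length_enumerate, hi]), ?_, ?_⟩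
    · exact List.getElem_mem _
    · rw [PySem.List.getElem_enumerate]; simp
  exact PySem.Dict.getD_of_mem_items pos hmem hknd 0

theorem pv_pos_pairwise (keys : List Int) (hnd : keys.Nodup) :
    keys.Pairwise (fun a b =>
      ((PySem.List.enumerate keys).foldl (fun (p : PySem.Dict Int Int) (ik : Int × Int) => p.insert ik.2 ik.1) PySem.Dict.empty).getD a 0
      < ((PySem.List.enumerate keys).foldl (fun (p : PySem.Dict Int Int) (ik : Int × Int) => p.insert ik.2 ik.1) PySem.Dict.empty).getD b 0) := by
  rw [List.pairwise_iff_getElem]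
  intro i j hi hj hij
  rw [pv_pos_getD keys hnd i hi, pv_pos_getD keys hnd j hj]
  exact_mod_cast hij

theorem pv_cands_eq (d0 : PySem.Dict Int Int) (rev : PySem.Dict Int (List Int))
    (pos : PySem.Dict Int Int)
    (Hrev : ∀ m, rev.getD m [] = d0.keys.filter (fun k => decide (d0.getD k 0 = m)))
    (Hpos : d0.keys.Pairwise (fun a b => pos.getD a 0 < pos.getD b 0))
    (Vb : PySem.Set Int) (fr : List Int) (hfr : fr.Nodup) :
    PySem.List.sorted (pvBGather rev Vb fr) (fun k => pos.getD k 0) false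
      = d0.keys.filter (fun k => decide (d0.getD k 0 ∈ fr) && !decide (k ∈ Vb)) := by
  rw [pvBGather_eq]
  have h1 : (fun m => (rev.getD m []).filter (fun k => !decide (k ∈ Vb)))
      = (fun m => d0.keys.filter (fun k => decide (d0.getD k 0 = m) && !decide (k ∈ Vb))) := by
    funext m
    rw [Hrev m, List.filter_filter]
    exact List.filter_congr (fun x _ => Bool.and_comm _ _)
  rw [h1]
  apply PySem.List.sorted_eq_of_perm_of_pairwise_lt
  · exact (pv_flatMap_perm d0.keys (fun k => d0.getD k 0) (fun k => !decide (k ∈ Vb)) fr hfr).symm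
  · exact List.Pairwise.sublist (List.filter_sublist) Hpos

theorem pvBLoop_nil (rev : PySem.Dict Int (List Int)) (pos : PySem.Dict Int Int)
    (f : Nat) (Vb : PySem.Set Int) (com : List Int) :
    pvBLoop rev pos f Vb com [] = (com, Vb) := by cases f <;> rfl

theorem pv_mem_foldl_add (l : List Int) : ∀ (s : PySem.Set Int) (y : Int),
    y ∈ l.foldl PySem.Set.add s ↔ y ∈ s ∨ y ∈ l := by
  induction l with
  | nil => simp
  | cons a l ih =>
    intro s y
    rw [List.foldl_cons, ih, PySem.Set.mem_add, List.mem_cons]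
    tauto

theorem pv_mem_new (d : PySem.Dict Int Int) (ant com : List Int) (k : Int) :
    k ∈ pvNew d ant com ↔ k ∈ d.keys ∧ d.getD k 0 ∈ ant ∧ k ∉ com := by
  simp [pvNew, List.mem_filter]

theorem pv_cands_new (d0 rem : PySem.Dict Int Int) (V : List Int)
    (Hkeys : rem.keys = d0.keys.filter (fun k => !decide (k ∈ V)))
    (Hval : ∀ k ∈ rem.keys, rem.getD k 0 = d0.getD k 0)
    (Vb : PySem.Set Int) (com fr : List Int)
    (HV : ∀ x, x ∈ Vb ↔ x ∈ V ∨ x ∈ com)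
    (Hfs : ∀ x ∈ fr, x ∈ com)
    (Hinv3 : ∀ k ∈ rem.keys, k ∉ com → rem.getD k 0 ∈ com → rem.getD k 0 ∈ fr) :
    d0.keys.filter (fun k => decide (d0.getD k 0 ∈ fr) && !decide (k ∈ Vb))
      = pvNew rem com com := by
  unfold pvNew
  rw [Hkeys, List.filter_filter]
  apply List.filter_congr
  intro k hk
  have hVb := HV k
  by_cases h1 : k ∈ V
  · have : k ∈ Vb := hVb.mpr (Or.inl h1)
    simp [h1, this]
  · have hkrem : k ∈ rem.keys := by
      rw [Hkeys, List.mem_filter]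
      exact ⟨hk, by simp [h1]⟩
    have hval := Hval k hkrem
    by_cases h2 : k ∈ com
    · have : k ∈ Vb := hVb.mpr (Or.inr h2)
      simp [h1, h2, this]
    · have hnVb : k ∉ Vb := fun h => by rcases hVb.mp h with h | h <;> [exact h1 h; exact h2 h]
      have hiff : d0.getD k 0 ∈ fr ↔ rem.getD k 0 ∈ com := by
        constructor
        · intro h; rw [hval]; exact Hfs _ h
        · intro h; rw [← hval]; exact Hinv3 k hkrem h2 h
      simp [h1, h2, hnVb, hiff]

theorem pvBLoop_eq (d0 rem : PySem.Dict Int Int) (rev : PySem.Dict Int (List Int))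
    (pos : PySem.Dict Int Int) (V : List Int)
    (hk0 : d0.keys.Nodup)
    (Hrev : ∀ m, rev.getD m [] = d0.keys.filter (fun k => decide (d0.getD k 0 = m)))
    (Hpos : d0.keys.Pairwise (fun a b => pos.getD a 0 < pos.getD b 0))
    (Hkeys : rem.keys = d0.keys.filter (fun k => !decide (k ∈ V)))
    (Hval : ∀ k ∈ rem.keys, rem.getD k 0 = d0.getD k 0) :
    ∀ (f : Nat) (Vb : PySem.Set Int) (com fr : List Int),
    (∀ x, x ∈ Vb ↔ x ∈ V ∨ x ∈ com) →
    (∀ x ∈ fr, x ∈ com) →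
    fr.Nodup →
    (∀ k ∈ rem.keys, k ∉ com → rem.getD k 0 ∈ com → rem.getD k 0 ∈ fr) →
    pvMu rem com < f →
    (pvBLoop rev pos (f+1) Vb com fr).1 = pvFixLoop rem f com
      ∧ ∀ x, (x ∈ (pvBLoop rev pos (f+1) Vb com fr).2 ↔ x ∈ V ∨ x ∈ pvFixLoop rem f com) := by
  intro f
  induction f with
  | zero => intro Vb com fr _ _ _ _ h; omega
  | succ f ih =>
    intro Vb com fr HV Hfs Hfn Hinv3 hmu
    have hcands : PySem.List.sorted (pvBGather rev Vb fr) (fun k => pos.getD k 0) false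
        = pvNew rem com com := by
      rw [pv_cands_eq d0 rev pos Hrev Hpos Vb fr Hfn]
      exact pv_cands_new d0 rem V Hkeys Hval Vb com fr HV Hfs Hinv3
    by_cases hfr : fr = []
    · subst hfr
      have hfix : pvF rem com = com := by
        rw [pvF_ne_iff]
        rcases h : pvNew rem com com with _ | ⟨k, tl⟩
        · rfl
        · exfalso
          have hk : k ∈ pvNew rem com com := by rw [h]; exact List.mem_cons_self
          rw [pv_mem_new] at hk
          exact (List.not_mem_nil (a := rem.getD k 0)) (Hinv3 k hk.1 hk.2.2 hk.2.1)
      rw [pvBLoop_nil, pvFixLoop, if_pos hfix]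
      exact ⟨rfl, fun x => HV x⟩
    · rw [pvBLoop, if_neg hfr]
      simp only [hcands]
      by_cases hc : pvNew rem com com = []
      · have hfix : pvF rem com = com := (pvF_ne_iff rem com).mpr hc
        rw [hc, List.append_nil, pvBLoop_nil, pvFixLoop, if_pos hfix]
        exact ⟨rfl, fun x => HV x⟩
      · have hfix : pvF rem com ≠ com := fun h => hc ((pvF_ne_iff rem com).mp h)
        have hmu' : pvMu rem (pvF rem com) < f := by
          have := pvMu_F_lt rem com hfix
          omega
        have hres := ih (pvNew rem com com |>.foldl PySem.Set.add Vb)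
          (com ++ pvNew rem com com) (pvNew rem com com)
          (fun x => by
            rw [pv_mem_foldl_add, HV x, List.mem_append]
            tauto)
          (fun x hx => List.mem_append_right _ hx)
          (List.Nodup.filter _ (Hkeys ▸ List.Nodup.filter _ hk0))
          (fun k hkrem hkcom hvcom => by
            rcases List.mem_append.mp hvcom with h | h
            · exfalso
              have hkc : k ∉ com := fun hkc2 => hkcom (List.mem_append_left _ hkc2)
              have : k ∈ pvNew rem com com := by
                rw [pv_mem_new]
                exact ⟨hkrem, h, hkc⟩
              exact hkcom (List.mem_append_right _ this)
            · exact h)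
          hmu'
        rw [pvFixLoop, if_neg hfix]
        exact hres

theorem pv_erase_fold_items (com : List Int) : ∀ rem : PySem.Dict Int Int,
    (com.foldl (fun d e => d.erase e) rem).items
      = rem.items.filter (fun p => !decide (p.1 ∈ com)) := by
  induction com with
  | nil => intro rem; simp
  | cons e com ih =>
    intro rem
    rw [List.foldl_cons, ih (rem.erase e)]
    have he : (rem.erase e).items = rem.items.filter (fun p => !(p.1 == e)) := by
      simp [PySem.Dict.erase]
    rw [he, List.filter_filter]
    apply List.filter_congr
    intro p _
    by_cases h1 : p.1 = e
    · simp [h1]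
    · by_cases h2 : p.1 ∈ com <;> simp [h1, h2]

theorem pv_keys_eq_map (d : PySem.Dict Int Int) : d.keys = d.items.map Prod.fst := by
  simp [PySem.Dict.keys]

theorem pv_size_eq (d : PySem.Dict Int Int) : d.size = d.keys.length := by
  simp [PySem.Dict.size, pv_keys_eq_map]

theorem pv_erase_fold_keys (com : List Int) (rem : PySem.Dict Int Int) :
    (com.foldl (fun d e => d.erase e) rem).keys
      = rem.keys.filter (fun k => !decide (k ∈ com)) := by
  rw [pv_keys_eq_map, pv_erase_fold_items, pv_keys_eq_map]
  rw [List.filter_map]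
  rfl

theorem pv_get?_filter (com : List Int) (k : Int) (hk : k ∉ com) :
    ∀ l : List (Int × Int),
    (PySem.Dict.mk (l.filter (fun p => !decide (p.1 ∈ com)))).get? k
      = (PySem.Dict.mk l).get? k := by
  intro l
  induction l with
  | nil => simp
  | cons p l ih =>
    by_cases hp : p.1 ∈ com
    · rw [List.filter_cons_of_neg (by simp [hp]), ih, PySem.Dict.get?_mk_cons]
      have : ¬(p.1 == k) := by
        simp only [beq_iff_eq]
        rintro rfl; exact hk hp
      simp [this]
    · rw [List.filter_cons_of_pos (by simp [hp]), PySem.Dict.get?_mk_cons,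
        PySem.Dict.get?_mk_cons, ih]

theorem pv_erase_fold_get? (com : List Int) (rem : PySem.Dict Int Int) (k : Int) (hk : k ∉ com) :
    (com.foldl (fun d e => d.erase e) rem).get? k = rem.get? k := by
  have h1 : (com.foldl (fun d e => d.erase e) rem)
      = PySem.Dict.mk (rem.items.filter (fun p => !decide (p.1 ∈ com))) := by
    apply PySem.Dict.ext
    rw [pv_erase_fold_items]
  rw [h1]
  have h2 : rem = PySem.Dict.mk rem.items := rfl
  conv_rhs => rw [h2]
  exact pv_get?_filter com k hk rem.items

theorem pv_erase_fold_getD (com : List Int) (rem : PySem.Dict Int Int) (k : Int) (hk : k ∉ com) :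
    (com.foldl (fun d e => d.erase e) rem).getD k 0 = rem.getD k 0 := by
  rw [PySem.Dict.getD_eq_get?_getD, PySem.Dict.getD_eq_get?_getD, pv_erase_fold_get? com rem k hk]


theorem pv_mu_le (d : PySem.Dict Int Int) (com : List Int) : pvMu d com ≤ d.keys.length :=
  List.length_filter_le _ _

theorem pv_outer (d0 : PySem.Dict Int Int) (rev : PySem.Dict Int (List Int))
    (pos : PySem.Dict Int Int)
    (hk0 : d0.keys.Nodup)
    (Hrev : ∀ m, rev.getD m [] = d0.keys.filter (fun k => decide (d0.getD k 0 = m)))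
    (Hpos : d0.keys.Pairwise (fun a b => pos.getD a 0 < pos.getD b 0)) :
    ∀ (suf pre : List Int) (V : PySem.Set Int) (rem : PySem.Dict Int Int) (f : Nat)
      (out : List (List Int)),
    d0.keys = pre ++ suf →
    (∀ k ∈ pre, k ∈ V) →
    rem.keys = d0.keys.filter (fun k => !decide (k ∈ V)) →
    (∀ k ∈ rem.keys, rem.getD k 0 = d0.getD k 0) →
    rem.size < f →
    (suf.foldl
      (fun st start =>
        if start ∈ st.1 then st
        else
          let t := d0.getD start 0
          if t = start then (PySem.Set.add st.1 start, st.2 ++ [[start]])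
          else
            let r := pvBLoop rev pos (d0.keys.length + 2)
              (PySem.Set.add (PySem.Set.add st.1 start) t) [start, t] [start, t]
            (r.2, st.2 ++ [r.1]))
      (V, out)).2 = out ++ pvAOuter f rem := by
  intro suf
  induction suf with
  | nil =>
    intro pre V rem f out hsplit hpre Hkeys Hval hf
    obtain ⟨f', rfl⟩ : ∃ f', f = f' + 1 := ⟨f - 1, by omega⟩
    have hrk : rem.keys = [] := by
      rw [Hkeys, List.filter_eq_nil_iff]
      intro k hk
      have : k ∈ V := hpre k (by simpa [hsplit] using hk)
      simp [this]
    rw [List.foldl_nil, pvAOuter, if_pos hrk]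
    simp
  | cons s suf' ih =>
    intro pre V rem f out hsplit hpre Hkeys Hval hf
    obtain ⟨f', rfl⟩ : ∃ f', f = f' + 1 := ⟨f - 1, by omega⟩
    rw [List.foldl_cons]
    by_cases hsV : s ∈ V
    · rw [if_pos (by exact hsV)]
      exact ih (pre ++ [s]) V rem (f'+1) out (by rw [hsplit, List.append_assoc]; rfl)
        (by intro k hk; rcases List.mem_append.mp hk with h | h
            · exact hpre k h
            · rwa [List.mem_singleton.mp h]) Hkeys Hval hf
    · rw [if_neg (by exact hsV)]
      have hprefilter : pre.filter (fun k => !decide (k ∈ V)) = [] := by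
        rw [List.filter_eq_nil_iff]; intro k hk; simp [hpre k hk]
      have hremkeys : rem.keys = s :: suf'.filter (fun k => !decide (k ∈ V)) := by
        rw [Hkeys, hsplit, List.filter_append, hprefilter, List.nil_append,
          List.filter_cons_of_pos (by simp [hsV])]
      have hrne : rem.keys ≠ [] := by rw [hremkeys]; simp
      have hsrem : s ∈ rem.keys := by rw [hremkeys]; exact List.mem_cons_self
      have hvs : rem.getD s 0 = d0.getD s 0 := Hval s hsrem
      have hrnd : rem.keys.Nodup := Hkeys ▸ List.Nodup.filter _ hk0
      have hsize : rem.size = rem.keys.length := pv_size_eq rem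
      have hheadI : rem.keys.headI = s := by rw [hremkeys]; rfl
      have hremlen : rem.keys.length ≤ d0.keys.length := by
        rw [Hkeys]; exact List.length_filter_le _ _
      by_cases ht : d0.getD s 0 = s
      · -- singleton community [s]
        rw [if_pos (by exact ht)]
        have hAOuter : pvAOuter (f'+1) rem
            = [s] :: pvAOuter f' ([s].foldl (fun d e => d.erase e) rem) := by
          rw [pvAOuter, if_neg hrne]
          simp only [hheadI, hvs, ht, ne_eq, not_true_eq_false, if_false]
        rw [hAOuter]
        have hrem'keys : ([s].foldl (fun d e => d.erase e) rem).keys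
            = rem.keys.filter (fun k => !decide (k ∈ [s])) := pv_erase_fold_keys _ _
        have Hkeys' : ([s].foldl (fun d e => d.erase e) rem).keys
            = d0.keys.filter (fun k => !decide (k ∈ PySem.Set.add V s)) := by
          rw [hrem'keys, Hkeys, List.filter_filter]
          apply List.filter_congr
          intro k _
          by_cases h1 : k ∈ V
          · simp [h1, PySem.Set.mem_add]
          · by_cases h2 : k = s <;> simp [h1, h2, PySem.Set.mem_add]
        have hres := ih (pre ++ [s]) (PySem.Set.add V s)
          ([s].foldl (fun d e => d.erase e) rem) f' (out ++ [[s]])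
          (by rw [hsplit, List.append_assoc]; rfl)
          (by intro k hk
              rcases List.mem_append.mp hk with h | h
              · exact (PySem.Set.mem_add _ _ _).mpr (Or.inl (hpre k h))
              · exact (PySem.Set.mem_add _ _ _).mpr (Or.inr (List.mem_singleton.mp h)))
          Hkeys'
          (by intro k hk
              have hks : k ∉ [s] := by
                rw [hrem'keys, List.mem_filter] at hk
                simpa using hk.2
              rw [pv_erase_fold_getD _ _ _ hks]
              exact Hval k (by rw [hrem'keys] at hk; exact List.mem_of_mem_filter hk))
          (by rw [pv_size_eq, hrem'keys, hremkeys,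
                List.filter_cons_of_neg (by simp)]
              have h9 := List.length_filter_le (fun k => !decide (k ∈ [s]))
                (suf'.filter (fun k => !decide (k ∈ V)))
              rw [hsize, hremkeys] at hf
              simp only [List.length_cons] at hf
              omega)
        rw [hres, List.append_assoc]
        rfl
      · -- proper community via the fixpoint
        rw [if_neg (by exact ht)]
        have hts : ¬ (s = d0.getD s 0) := fun h => ht h.symm
        have hμ : pvMu rem [s, d0.getD s 0] ≤ rem.keys.length := pv_mu_le rem _
        have hApv : pvALoop rem (rem.size + 2) [s, d0.getD s 0] []
            = pvFixLoop rem (d0.keys.length + 1) [s, d0.getD s 0] := by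
          have h1 := pvALoop_eq rem hrnd (rem.size + 1) [s, d0.getD s 0] [] (by simp)
            (by omega)
          calc pvALoop rem (rem.size + 2) [s, d0.getD s 0] []
              = pvALoop rem ((rem.size + 1) + 1) [s, d0.getD s 0] [] := rfl
            _ = pvFixLoop rem (rem.size + 1) [s, d0.getD s 0] := h1
            _ = pvFixLoop rem (d0.keys.length + 1) [s, d0.getD s 0] :=
                pvFixLoop_stable rem _ _ _ (by omega) (by omega)
        have hAOuter : pvAOuter (f'+1) rem
            = (pvALoop rem (rem.size + 2) [s, d0.getD s 0] [])
              :: pvAOuter f'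
                ((pvALoop rem (rem.size + 2) [s, d0.getD s 0] []).foldl
                  (fun d e => d.erase e) rem) := by
          rw [pvAOuter, if_neg hrne]
          simp only [hheadI, hvs, ne_eq, eq_false hts, not_false_eq_true, if_true]
        have hB := pvBLoop_eq d0 rem rev pos V hk0 Hrev Hpos Hkeys Hval
          (d0.keys.length + 1) (PySem.Set.add (PySem.Set.add V s) (d0.getD s 0))
          [s, d0.getD s 0] [s, d0.getD s 0]
          (by intro x
              rw [PySem.Set.mem_add, PySem.Set.mem_add, List.mem_cons, List.mem_singleton]
              tauto)
          (fun x hx => hx)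
          (by simp [hts])
          (fun k _ _ h => h)
          (by omega)
        obtain ⟨hB1, hB2⟩ := hB
        have hfuel : (d0.keys.length + 1) + 1 = d0.keys.length + 2 := rfl
        rw [hfuel] at hB1 hB2
        set com := pvFixLoop rem (d0.keys.length + 1) [s, d0.getD s 0] with hcomdef
        have hscom : s ∈ com := (pvFixLoop_prefix rem _ _).subset (by simp)
        have hrem'keys : (com.foldl (fun d e => d.erase e) rem).keys
            = rem.keys.filter (fun k => !decide (k ∈ com)) := pv_erase_fold_keys _ _
        have Hkeys' : (com.foldl (fun d e => d.erase e) rem).keys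
            = d0.keys.filter (fun k => !decide (k ∈ (pvBLoop rev pos (d0.keys.length + 2)
                (PySem.Set.add (PySem.Set.add V s) (d0.getD s 0))
                [s, d0.getD s 0] [s, d0.getD s 0]).2)) := by
          rw [hrem'keys, Hkeys, List.filter_filter]
          apply List.filter_congr
          intro k _
          by_cases h1 : k ∈ V
          · simp [h1, hB2 k]
          · by_cases h2 : k ∈ com <;> simp [h1, h2, hB2 k]
        have hres := ih (pre ++ [s])
          (pvBLoop rev pos (d0.keys.length + 2)
            (PySem.Set.add (PySem.Set.add V s) (d0.getD s 0))
            [s, d0.getD s 0] [s, d0.getD s 0]).2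
          (com.foldl (fun d e => d.erase e) rem) f' (out ++ [com])
          (by rw [hsplit, List.append_assoc]; rfl)
          (by intro k hk
              rcases List.mem_append.mp hk with h | h
              · exact (hB2 k).mpr (Or.inl (hpre k h))
              · exact (hB2 k).mpr (Or.inr (List.mem_singleton.mp h ▸ hscom)))
          Hkeys'
          (by intro k hk
              have hkc : k ∉ com := by
                rw [hrem'keys, List.mem_filter] at hk
                simpa using hk.2
              rw [pv_erase_fold_getD _ _ _ hkc]
              exact Hval k (by rw [hrem'keys] at hk; exact List.mem_of_mem_filter hk))
          (by rw [pv_size_eq, hrem'keys, hremkeys,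
                List.filter_cons_of_neg (by simp [hscom])]
              have h9 := List.length_filter_le (fun k => !decide (k ∈ com))
                (suf'.filter (fun k => !decide (k ∈ V)))
              rw [hsize, hremkeys] at hf
              simp only [List.length_cons] at hf
              omega)
        simp only [hB1]
        rw [hAOuter, hApv, hres, List.append_assoc]
        rfl

set_option maxHeartbeats 2000000 in
theorem pv_final (ind : List (Int × Int)) :
    individuo_comunidades ind = individuo_comunidades_alt ind := by
  have hk0 : (PySem.Dict.ofList ind).keys.Nodup := PySem.Dict.nodup_keys_ofList ind
  have h := pv_outer (PySem.Dict.ofList ind)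
    ((PySem.Dict.ofList ind).keys.foldl
      (fun r k => r.modify ((PySem.Dict.ofList ind).getD k 0) [] (· ++ [k])) PySem.Dict.empty)
    ((PySem.List.enumerate (PySem.Dict.ofList ind).keys).foldl
      (fun p ik => p.insert ik.2 ik.1) PySem.Dict.empty)
    hk0
    (fun m => pv_rev_eq (PySem.Dict.ofList ind) (PySem.Dict.ofList ind).keys m)
    (pv_pos_pairwise (PySem.Dict.ofList ind).keys hk0)
    (PySem.Dict.ofList ind).keys [] PySem.Set.empty (PySem.Dict.ofList ind)
    ((PySem.Dict.ofList ind).size + 1) []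
    (List.nil_append _).symm
    (by intro k hk; exact absurd hk (List.not_mem_nil))
    (by simp [PySem.Set.empty])
    (fun k _ => rfl)
    (Nat.lt_succ_self _)
  rw [List.nil_append] at h
  exact h.symm

-- ===== VERDICT (by name: the statement is the Claim_ definition above) =====
theorem individuo_comunidades_spec : Claim_equal_individuo_comunidades := by
  unfold Claim_equal_individuo_comunidades
  intro individuo _
  unfold Spec_individuo_comunidades
  exact pv_final individuo
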